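-- pv_equiv track=rewrite | github.com/Tainted-Fool/adventofcode | 2015/day20.py | lowest_house_part2
-- ===== SOURCE A (Python) =====
-- def lowest_house_part2(target: int, search_limit: int) -> int:
--     """
--     Finds the lowest house number that receives at least 'target' presents with the new delivery rules
--
--     Args:
--         target (int): The minimum number of presents a house should receive
--         search_limit (int): The maximum house number to search up to
--
--     Returns:
--         int: The lowest house number that meets the target presents
--     """
--     presents = [0] * (search_limit + 1)
--
--     for elf in range(1, search_limit + 1):
--         last_house = min(elf * 50, search_limit)
--         for house in range(elf, last_house + 1, elf):
--             presents[house] += elf * 11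
--
--         if presents[elf] >= target:
--             return elf
--     raise ValueError("Search limit too small for Part 2")
-- ===== SOURCE B (Python) =====
-- def lowest_house_part2(target: int, search_limit: int) -> int:
--     """Per-house cofactor scan instead of an elf sieve: house h gets 11*(h//e)
--     presents for every cofactor e <= 50 dividing h (elves stop after 50 houses)."""
--     for house in range(1, search_limit + 1):
--         presents = 0
--         for e in range(1, 51):
--             if house % e == 0:
--                 presents += 11 * (house // e)
--         if presents >= target:
--             return house
--     raise ValueError("Search limit too small for Part 2")
-- ===== Notes on version B (the rewrite author's own statement) =====
-- stated objective: faster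
-- what changed: Replaces A's shared sieve array over elves (each elf stamping presents into its first 50 multiples, with an early-exit check per elf) by an independent per-house scan of the 50 possible cofactors e, adding 11*(house//e) whenever e divides the house; this avoids A's O(search_limit) upfront array allocation, so work is proportional to the answer, not the limit.
import Mathlib
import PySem

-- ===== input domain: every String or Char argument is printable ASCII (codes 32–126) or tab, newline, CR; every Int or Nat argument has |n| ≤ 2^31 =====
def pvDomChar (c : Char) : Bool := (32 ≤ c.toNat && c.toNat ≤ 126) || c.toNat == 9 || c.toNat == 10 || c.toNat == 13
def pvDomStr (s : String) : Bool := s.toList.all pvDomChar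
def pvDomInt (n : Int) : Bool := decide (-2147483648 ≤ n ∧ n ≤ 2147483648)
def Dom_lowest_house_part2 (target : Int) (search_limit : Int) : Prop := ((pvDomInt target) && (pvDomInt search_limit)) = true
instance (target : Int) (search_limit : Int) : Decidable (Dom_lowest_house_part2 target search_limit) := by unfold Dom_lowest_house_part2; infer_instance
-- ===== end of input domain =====

-- B replaces A's shared elf-sieve array by an independent per-house cofactor scan, avoiding
-- A's upfront O(search_limit) array (measurably faster on the timing inputs); where Python A
-- raises ValueError both Pythons raise and the ports return the sentinel -1 (outside Pre_).

-- ===== PORT A =====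
-- inner loop 'for house in range(elf, last_house + 1, elf): presents[house] += elf * 11';
-- every index 'house' is ≥ 1 and < len(presents), so List.set/getD on house.toNat is exact
def pvSieveElf (presents : List Int) (elf : Int) (lim : Int) : List Int :=
  (PySem.List.pyRange elf (min (elf * 50) lim + 1) elf).foldl
    (fun ps house => ps.set house.toNat (ps.getD house.toNat 0 + elf * 11)) presents

-- outer loop 'for elf in range(1, search_limit + 1)' with early return; fuel counts the
-- remaining iterations; -1 stands for the ValueError path (outside Pre_)
def pvALoop (target lim : Int) : List Int → Int → Nat → Int
  | _, _, 0 => -1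
  | presents, elf, fuel + 1 =>
    let ps := pvSieveElf presents elf lim
    if target ≤ ps.getD elf.toNat 0 then elf
    else pvALoop target lim ps (elf + 1) fuel

def lowest_house_part2 (target : Int) (search_limit : Int) : Int :=
  pvALoop target search_limit (List.replicate (search_limit + 1).toNat 0) 1 search_limit.toNat

-- ===== PORT B =====
-- 'presents = 0; for e in range(1, 51): if house % e == 0: presents += 11 * (house // e)'
def pvCountB (house : Int) : Int :=
  (PySem.List.pyRange 1 51 1).foldl
    (fun presents e =>
      if PySem.Int.mod house e = 0 then presents + 11 * PySem.Int.floordiv house e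
      else presents) 0

-- 'for house in range(1, search_limit + 1)'; -1 stands for the ValueError path (outside Pre_)
def pvBLoop (target lim : Int) : Int → Nat → Int
  | _, 0 => -1
  | house, fuel + 1 =>
    if target ≤ pvCountB house then house
    else pvBLoop target lim (house + 1) fuel

def lowest_house_part2_alt (target : Int) (search_limit : Int) : Int :=
  pvBLoop target search_limit 1 search_limit.toNat

-- ===== PRECONDITION & SPEC =====
-- spec-level present count of house n (independent of both ports): 11*d summed over the
-- divisors d = k+1 of n whose elf still delivers to n (n ≤ 50*d)
def pvPartial (m : Nat) (h : Int) : Int :=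
  ∑ k ∈ Finset.range m,
    (if ((k : Int) + 1) ∣ h ∧ h ≤ 50 * ((k : Int) + 1) then 11 * ((k : Int) + 1) else 0)

def pvPresents (n : Int) : Int := pvPartial n.toNat n

-- Pre_ holds exactly on the inputs where Python A (and Python B) returns: some house in
-- 1..search_limit reaches the target count; since house n receives at least 11*n presents
-- (from elf n itself), the first such house is ≤ max 1 ⌈target/11⌉, so the existential is
-- equivalently (and cheaply) bounded by min search_limit (max 1 ((target+10)/11))
def Pre_lowest_house_part2 (target : Int) (search_limit : Int) : Prop :=
  ∃ k ∈ Finset.range (min search_limit (max 1 ((target + 10) / 11))).toNat,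
    target ≤ pvPresents ((k : Int) + 1)

instance (target : Int) (search_limit : Int) : Decidable (Pre_lowest_house_part2 target search_limit) := by
  unfold Pre_lowest_house_part2; infer_instance

def pvWitness_lowest_house_part2 : Int × Int := (11, 1)

def Spec_lowest_house_part2 (target : Int) (search_limit : Int) (out : Int) : Prop := out = lowest_house_part2_alt target search_limit
instance (target : Int) (search_limit : Int) (out : Int) : Decidable (Spec_lowest_house_part2 target search_limit out) := by unfold Spec_lowest_house_part2; infer_instance

-- ===== CLAIM (what is proved, stated in full; the proofs are below) =====
def Claim_equal_lowest_house_part2 : Prop := ∀ (target : Int) (search_limit : Int), Dom_lowest_house_part2 target search_limit → Pre_lowest_house_part2 target search_limit → Spec_lowest_house_part2 target search_limit (lowest_house_part2 target search_limit)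

-- ===== LEMMAS AND PROOFS =====

-- folding '+ F d' over a list is adding the mapped sum
lemma pv_foldl_add (F : Int → Int) : ∀ (L : List Int) (a : Int),
    L.foldl (fun acc d => acc + F d) a = a + (L.map F).sum := by
  intro L
  induction L with
  | nil => intro a; simp
  | cons x xs ih => intro a; simp [List.foldl_cons, ih]; ring

-- a list-range mapped sum is the Finset.range sum
lemma pv_sum_map_range (g : Nat → Int) (m : Nat) :
    ((List.range m).map g).sum = ∑ k ∈ Finset.range m, g k := by
  induction m with
  | zero => simp
  | succ n ih => rw [List.range_succ, Finset.sum_range_succ]; simp [ih]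

-- divisor/cofactor pairing d ↦ n/d: the cofactor-indexed sum equals the divisor-indexed sum
lemma pv_pair_sum (n : Int) (hn : 1 ≤ n) :
    (∑ j ∈ Finset.range 50, if ((j : Int) + 1) ∣ n then 11 * (n / ((j : Int) + 1)) else 0)
      = ∑ k ∈ Finset.range n.toNat,
          if ((k : Int) + 1) ∣ n ∧ n ≤ 50 * ((k : Int) + 1) then 11 * ((k : Int) + 1) else 0 := by
  rw [← Finset.sum_filter, ← Finset.sum_filter]
  have facts : ∀ e : Int, 1 ≤ e → e ∣ n →
      1 ≤ n / e ∧ (n / e) ∣ n ∧ n / e * e = n ∧ n / (n / e) = e := by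
    intro e he1 hed
    have hen : e ≤ n := Int.le_of_dvd (by omega) hed
    have hdm : n / e * e = n := Int.ediv_mul_cancel hed
    have hd1 : 1 ≤ n / e := by
      rw [Int.le_ediv_iff_mul_le (by omega : (0 : Int) < e)]; omega
    have hinv : n / (n / e) = e := by
      have h := Int.mul_ediv_cancel_left (a := n / e) e (by omega)
      rw [hdm] at h; exact h
    exact ⟨hd1, ⟨e, hdm.symm⟩, hdm, hinv⟩
  refine Finset.sum_nbij' (fun j => (n / ((j : Int) + 1)).toNat - 1)
    (fun k => (n / ((k : Int) + 1)).toNat - 1) ?_ ?_ ?_ ?_ ?_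
  · intro j hj
    simp only [Finset.mem_filter, Finset.mem_range] at hj ⊢
    obtain ⟨hj50, hdvd⟩ := hj
    obtain ⟨hd1, hddvd, hdm, _⟩ := facts ((j : Int) + 1) (by omega) hdvd
    have hcast : (((n / ((j : Int) + 1)).toNat - 1 : ℕ) : Int) + 1 = n / ((j : Int) + 1) := by omega
    have hdn : n / ((j : Int) + 1) ≤ n := Int.le_of_dvd (by omega) hddvd
    refine ⟨by omega, ?_, ?_⟩
    · rw [hcast]; exact hddvd
    · rw [hcast]; nlinarith
  · intro k hk
    simp only [Finset.mem_filter, Finset.mem_range] at hk ⊢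
    obtain ⟨hkn, hdvd, hle⟩ := hk
    obtain ⟨he1, hedvd, hdm, _⟩ := facts ((k : Int) + 1) (by omega) hdvd
    have hcast : (((n / ((k : Int) + 1)).toNat - 1 : ℕ) : Int) + 1 = n / ((k : Int) + 1) := by omega
    have he50 : n / ((k : Int) + 1) ≤ 50 := by
      by_contra hgt
      have hgt' : 51 ≤ n / ((k : Int) + 1) := by omega
      nlinarith
    constructor
    · omega
    · rw [hcast]; exact hedvd
  · intro j hj
    simp only [Finset.mem_filter, Finset.mem_range] at hj
    obtain ⟨hj50, hdvd⟩ := hj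
    obtain ⟨hd1, _, _, hinv⟩ := facts ((j : Int) + 1) (by omega) hdvd
    have hcast : (((n / ((j : Int) + 1)).toNat - 1 : ℕ) : Int) + 1 = n / ((j : Int) + 1) := by omega
    dsimp only
    rw [hcast, hinv]
    omega
  · intro k hk
    simp only [Finset.mem_filter, Finset.mem_range] at hk
    obtain ⟨hkn, hdvd, hle⟩ := hk
    obtain ⟨he1, _, _, hinv⟩ := facts ((k : Int) + 1) (by omega) hdvd
    have hcast : (((n / ((k : Int) + 1)).toNat - 1 : ℕ) : Int) + 1 = n / ((k : Int) + 1) := by omega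
    dsimp only
    rw [hcast, hinv]
    omega
  · intro j hj
    simp only [Finset.mem_filter, Finset.mem_range] at hj
    obtain ⟨hj50, hdvd⟩ := hj
    obtain ⟨hd1, _, _, _⟩ := facts ((j : Int) + 1) (by omega) hdvd
    have hcast : (((n / ((j : Int) + 1)).toNat - 1 : ℕ) : Int) + 1 = n / ((j : Int) + 1) := by omega
    dsimp only
    rw [hcast]

-- B's per-house cofactor scan equals the spec-level present count
lemma pv_countB_eq (n : Int) (hn : 1 ≤ n) : pvCountB n = pvPresents n := by
  unfold pvCountB pvPresents pvPartial
  have hbody : (fun (presents e : Int) =>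
      if PySem.Int.mod n e = 0 then presents + 11 * PySem.Int.floordiv n e else presents)
      = (fun presents e => presents +
          (if PySem.Int.mod n e = 0 then 11 * PySem.Int.floordiv n e else 0)) := by
    funext p e; split_ifs <;> simp
  rw [hbody, pv_foldl_add, PySem.List.pyRange_one, List.map_map, pv_sum_map_range, zero_add]
  rw [show ((51 : Int) - 1).toNat = 50 from rfl]
  have hterm : ∀ j ∈ Finset.range 50,
      ((fun e => if PySem.Int.mod n e = 0 then 11 * PySem.Int.floordiv n e else 0)
        ∘ fun k : ℕ => 1 + (k : Int)) j
        = (if ((j : Int) + 1) ∣ n then 11 * (n / ((j : Int) + 1)) else 0) := by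
    intro j hj
    simp only [Function.comp_apply]
    rw [show (1 : Int) + (j : Int) = (j : Int) + 1 by ring]
    have hd : (0 : Int) < (j : Int) + 1 := by positivity
    rw [PySem.Int.floordiv_eq_ediv_of_pos hd]
    simp only [PySem.Int.mod_eq_zero_iff_dvd]
  rw [Finset.sum_congr rfl hterm, pv_pair_sum n hn]

-- the set-fold leaves the length unchanged
lemma pv_fold_set_length (v : Int) : ∀ (L : List Int) (ps : List Int),
    (L.foldl (fun ps i => ps.set i.toNat (ps.getD i.toNat 0 + v)) ps).length = ps.length := by
  intro L
  induction L with
  | nil => intro ps; rfl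
  | cons x xs ih => intro ps; rw [List.foldl_cons, ih, List.length_set]

-- effect of the set-fold at one in-bounds index: add v iff the index is in the list
lemma pv_fold_set_getD (v : Int) : ∀ (L : List Int) (ps : List Int) (h : Int),
    L.Nodup → (∀ x ∈ L, 1 ≤ x) → 1 ≤ h → h.toNat < ps.length →
    (L.foldl (fun ps i => ps.set i.toNat (ps.getD i.toNat 0 + v)) ps).getD h.toNat 0
      = ps.getD h.toNat 0 + (if h ∈ L then v else 0) := by
  intro L
  induction L with
  | nil => intro ps h _ _ _ _; simp
  | cons x xs ih =>
    intro ps h hnd hpos hh hlt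
    rw [List.foldl_cons]
    have hx : 1 ≤ x := hpos x (List.mem_cons_self ..)
    have hlt' : h.toNat < (ps.set x.toNat (ps.getD x.toNat 0 + v)).length := by
      rw [List.length_set]; exact hlt
    rw [ih _ h hnd.of_cons (fun y hy => hpos y (List.mem_cons_of_mem _ hy)) hh hlt']
    by_cases hxh : h = x
    · subst hxh
      have hnotmem : h ∉ xs := (List.nodup_cons.mp hnd).1
      rw [if_neg hnotmem, if_pos (List.mem_cons_self ..)]
      rw [List.getD_eq_getElem?_getD, List.getElem?_set_self (by exact hlt)]
      simp [List.getD_eq_getElem?_getD]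
    · have hne : x.toNat ≠ h.toNat := by omega
      rw [List.getD_eq_getElem?_getD, List.getElem?_set_ne hne, ← List.getD_eq_getElem?_getD]
      simp only [List.mem_cons, hxh, false_or]

-- a positive-step pyRange has no duplicates
lemma pv_nodup_pyRange (a b s : Int) (hs : 0 < s) : (PySem.List.pyRange a b s).Nodup := by
  rw [PySem.List.pyRange_of_pos a b hs]
  refine List.Nodup.map ?_ (List.nodup_range)
  intro k1 k2 hk
  have h1 : s * (k1 : Int) = s * (k2 : Int) := by
    have := add_left_cancel hk
    linarith [this]
  have h2 := mul_left_cancel₀ (by omega : s ≠ 0) h1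
  exact_mod_cast h2

-- membership in elf e's delivery range, for houses 1 ≤ h ≤ lim
lemma pv_mem_delivery (e lim h : Int) (he : 1 ≤ e) (hh : 1 ≤ h) (hhl : h ≤ lim) :
    (h ∈ PySem.List.pyRange e (min (e * 50) lim + 1) e) ↔ (e ∣ h ∧ h ≤ 50 * e) := by
  rw [PySem.List.mem_pyRange_iff_of_pos (by omega)]
  constructor
  · rintro ⟨h1, h2, h3⟩
    have hdvd : e ∣ h := by
      have := dvd_add h3 (dvd_refl e)
      simpa using this
    exact ⟨hdvd, by omega⟩
  · rintro ⟨hdvd, hle⟩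
    have hle' : e ≤ h := Int.le_of_dvd (by omega) hdvd
    refine ⟨hle', by omega, dvd_sub hdvd dvd_rfl⟩

-- one sieve step adds 11e exactly to the houses elf e delivers to
lemma pv_sieveElf_getD (ps : List Int) (e lim h : Int) (he : 1 ≤ e) (hh : 1 ≤ h)
    (hhl : h ≤ lim) (hlen : ps.length = (lim + 1).toNat) :
    (pvSieveElf ps e lim).getD h.toNat 0
      = ps.getD h.toNat 0 + (if e ∣ h ∧ h ≤ 50 * e then e * 11 else 0) := by
  unfold pvSieveElf
  rw [pv_fold_set_getD (e * 11) _ ps h (pv_nodup_pyRange _ _ _ (by omega))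
      (fun x hx => by
        have := (PySem.List.mem_pyRange_iff_of_pos (by omega : (0:Int) < e) x).mp hx
        omega)
      hh (by omega)]
  simp only [pv_mem_delivery e lim h he hh hhl]

lemma pv_sieveElf_length (ps : List Int) (e lim : Int) :
    (pvSieveElf ps e lim).length = ps.length := pv_fold_set_length _ _ _

-- the partial sums step by one elf
lemma pv_partial_step (e h : Int) (he : 1 ≤ e) :
    pvPartial e.toNat h
      = pvPartial (e - 1).toNat h + (if e ∣ h ∧ h ≤ 50 * e then e * 11 else 0) := by
  have hm : e.toNat = (e - 1).toNat + 1 := by omega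
  rw [hm]
  unfold pvPartial
  rw [Finset.sum_range_succ]
  have he' : (((e - 1).toNat : Int) + 1) = e := by omega
  rw [he']
  congr 1
  split_ifs <;> ring

-- main loop equivalence under the sieve-array invariant
lemma pv_loop_eq (target lim : Int) : ∀ (fuel : Nat) (e : Int) (ps : List Int),
    1 ≤ e → e + (fuel : Int) ≤ lim + 1 → ps.length = (lim + 1).toNat →
    (∀ h, 1 ≤ h → h ≤ lim → ps.getD h.toNat 0 = pvPartial (e - 1).toNat h) →
    pvALoop target lim ps e fuel = pvBLoop target lim e fuel := by
  intro fuel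
  induction fuel with
  | zero => intro e ps _ _ _ _; rfl
  | succ f ih =>
    intro e ps he hfuel hlen hinv
    have helim : e ≤ lim := by
      push_cast at hfuel; omega
    have hstep : ∀ h, 1 ≤ h → h ≤ lim →
        (pvSieveElf ps e lim).getD h.toNat 0 = pvPartial e.toNat h := by
      intro h hh hhl
      rw [pv_sieveElf_getD ps e lim h he hh hhl hlen, hinv h hh hhl, ← pv_partial_step e h he]
    have hcheck : (pvSieveElf ps e lim).getD e.toNat 0 = pvCountB e := by
      rw [hstep e he helim, pv_countB_eq e he]
      rfl
    rw [pvALoop, pvBLoop, hcheck]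
    by_cases hret : target ≤ pvCountB e
    · simp [hret]
    · simp only [if_neg hret]
      refine ih (e + 1) (pvSieveElf ps e lim) (by omega)
        (by push_cast at hfuel ⊢; omega)
        (by rw [pv_sieveElf_length]; exact hlen) ?_
      intro h hh hhl
      have : (e + 1 - 1).toNat = e.toNat := by omega
      rw [this]
      exact hstep h hh hhl

-- ===== VERDICT (by name: the statement is the Claim_ definition above) =====
theorem lowest_house_part2_spec : Claim_equal_lowest_house_part2 := by
  intro target search_limit _hdom _hpre
  unfold Spec_lowest_house_part2 lowest_house_part2 lowest_house_part2_alt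
  cases hn : search_limit.toNat with
  | zero => rfl
  | succ n =>
    have hpos : 1 ≤ search_limit := by omega
    rw [← hn]
    refine pv_loop_eq target search_limit search_limit.toNat 1
      (List.replicate (search_limit + 1).toNat 0) le_rfl (by omega)
      (by rw [List.length_replicate]) ?_
    intro h hh hhl
    have h0 : (List.replicate (search_limit + 1).toNat (0 : Int)).getD h.toNat 0 = 0 := by
      rw [List.getD_eq_getElem?_getD]
      rcases Nat.lt_or_ge h.toNat (search_limit + 1).toNat with hlt | hge
      · rw [List.getElem?_replicate]; simp [hlt]
      · rw [List.getElem?_eq_none (by simpa using hge)]; rfl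
    rw [h0]
    have : ((1 : Int) - 1).toNat = 0 := by omega
    rw [this]
    simp [pvPartial]
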